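-- pv_equiv track=rewrite | github.com/priyanshu5259/Multifile_Encryption | app.py | multiplicative_cipher
-- ===== SOURCE A (Python) =====
-- def multiplicative_cipher(text, key):
--     result2 = ""
--     for char in text:
--         if char.isalpha():
--             result2 += chr(((ord(char) - 65) * key) % 26 + 65) if char.isupper() else chr(((ord(char) - 97) * key) % 26 + 97)
--         else:
--             result2 += char
--     return result2
-- ===== SOURCE B (Python) =====
-- def multiplicative_cipher(text, key):
--     table = {}
--     for c in range(26):
--         table[65 + c] = chr((c * key) % 26 + 65)
--         table[97 + c] = chr((c * key) % 26 + 97)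
--     return text.translate(table)
-- ===== Notes on version B (the rewrite author's own statement) =====
-- stated objective: faster
-- what changed: Precomputes a 52-entry translation table keyed by code point (one pass over range(26)) and applies it with str.translate in a single library pass, replacing the per-character Python loop with isalpha/isupper branches and repeated string concatenation.
import Mathlib
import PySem

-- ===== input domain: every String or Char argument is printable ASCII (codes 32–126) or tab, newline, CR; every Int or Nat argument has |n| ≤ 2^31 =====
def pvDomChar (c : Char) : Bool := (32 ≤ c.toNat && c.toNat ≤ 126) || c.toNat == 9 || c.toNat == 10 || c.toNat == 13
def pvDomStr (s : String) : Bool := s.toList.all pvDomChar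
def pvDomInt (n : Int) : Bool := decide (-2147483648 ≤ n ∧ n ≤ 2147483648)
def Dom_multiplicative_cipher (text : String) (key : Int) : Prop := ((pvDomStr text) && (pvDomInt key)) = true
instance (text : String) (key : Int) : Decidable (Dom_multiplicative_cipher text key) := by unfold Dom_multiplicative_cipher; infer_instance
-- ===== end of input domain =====

-- B builds a code-point translation table once and maps the text through it (str.translate);
-- A branches per character. Equivalence is proved for all inputs (no Pre_ needed).

-- ===== PORT A =====
-- literal port of A's per-character loop: accumulate the result string left to right
def multiplicative_cipher (text : String) (key : Int) : String :=
  String.ofList (text.toList.foldl (fun acc char =>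
    acc ++ [if PySem.Chars.isalpha char then
              (if PySem.Chars.isupper char then
                Char.ofNat ((PySem.Int.mod (((char.toNat : Int) - 65) * key) 26) + 65).toNat
              else
                Char.ofNat ((PySem.Int.mod (((char.toNat : Int) - 97) * key) 26) + 97).toNat)
            else char]) [])

-- ===== PORT B =====
-- Source B's table-building loop over range(26): two inserts per iteration
def mcTable (key : Int) : PySem.Dict Int Char :=
  (PySem.List.pyRange 0 26).foldl (fun d c =>
    (d.insert (65 + c) (Char.ofNat ((PySem.Int.mod (c * key) 26) + 65).toNat)).insert
      (97 + c) (Char.ofNat ((PySem.Int.mod (c * key) 26) + 97).toNat))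
    (PySem.Dict.mk [])

-- Source B's text.translate(table): look each code point up, keep the char on a miss
def multiplicative_cipher_alt (text : String) (key : Int) : String :=
  String.ofList (text.toList.map (fun ch => (((mcTable key).get? (ch.toNat : Int)).getD ch)))

-- ===== PRECONDITION & SPEC =====
def Spec_multiplicative_cipher (text : String) (key : Int) (out : String) : Prop := out = multiplicative_cipher_alt text key
instance (text : String) (key : Int) (out : String) : Decidable (Spec_multiplicative_cipher text key out) := by unfold Spec_multiplicative_cipher; infer_instance

-- ===== CLAIM (what is proved, stated in full; the proofs are below) =====
def Claim_equal_multiplicative_cipher : Prop := ∀ (text : String) (key : Int), Dom_multiplicative_cipher text key → Spec_multiplicative_cipher text key (multiplicative_cipher text key)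

-- ===== LEMMAS AND PROOFS =====

-- the table-building step, abbreviated for the lemmas
def mcStep (key : Int) (d : PySem.Dict Int Char) (c : Int) : PySem.Dict Int Char :=
  (d.insert (65 + c) (Char.ofNat ((PySem.Int.mod (c * key) 26) + 65).toNat)).insert
    (97 + c) (Char.ofNat ((PySem.Int.mod (c * key) 26) + 97).toNat)

lemma mcTable_eq (key : Int) : mcTable key = (PySem.List.pyRange 0 26).foldl (mcStep key) (PySem.Dict.mk []) := rfl

lemma char_isupper_iff (c : Char) : PySem.Chars.isupper c = true ↔ 65 ≤ c.toNat ∧ c.toNat ≤ 90 := by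
  simp only [PySem.Chars.isupper, Bool.and_eq_true, decide_eq_true_eq, Char.le_def,
    UInt32.le_iff_toNat_le, Char.toNat]
  exact Iff.rfl

lemma char_islower_iff (c : Char) : PySem.Chars.islower c = true ↔ 97 ≤ c.toNat ∧ c.toNat ≤ 122 := by
  simp only [PySem.Chars.islower, Bool.and_eq_true, decide_eq_true_eq, Char.le_def,
    UInt32.le_iff_toNat_le, Char.toNat]
  exact Iff.rfl

-- a key untouched by every iteration keeps its lookup
lemma mcFold_get_untouched (key n : Int) : ∀ (l : List Int) (d : PySem.Dict Int Char),
    (∀ c ∈ l, n ≠ 65 + c ∧ n ≠ 97 + c) →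
    (l.foldl (mcStep key) d).get? n = d.get? n := by
  intro l
  induction l with
  | nil => intro d _; rfl
  | cons a t ih =>
    intro d h
    have ha := h a (by simp)
    simp only [List.foldl_cons]
    rw [ih _ (fun c hc => h c (by simp [hc]))]
    unfold mcStep
    rw [PySem.Dict.get?_insert_of_ne _ _ ha.2, PySem.Dict.get?_insert_of_ne _ _ ha.1]

-- lookup of an uppercase slot 65+c after the fold
lemma mcFold_get_hi (key : Int) : ∀ (l : List Int) (d : PySem.Dict Int Char) (c : Int),
    c ∈ l → l.Nodup → (∀ x ∈ l, 0 ≤ x ∧ x < 26) →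
    (l.foldl (mcStep key) d).get? (65 + c) =
      some (Char.ofNat ((PySem.Int.mod (c * key) 26) + 65).toNat) := by
  intro l
  induction l with
  | nil => intro d c hc; simp at hc
  | cons a t ih =>
    intro d c hc hnd hbd
    simp only [List.foldl_cons]
    rcases List.mem_cons.mp hc with h | h
    · subst h
      have hct : c ∉ t := (List.nodup_cons.mp hnd).1
      have hunt : ∀ x ∈ t, (65 + c : Int) ≠ 65 + x ∧ (65 + c : Int) ≠ 97 + x := by
        intro x hx
        have hbx := hbd x (List.mem_cons_of_mem _ hx)
        have hbc := hbd c (by simp)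
        refine ⟨fun he => hct ?_, by omega⟩
        have : c = x := by omega
        exact this ▸ hx
      rw [mcFold_get_untouched key _ t _ hunt]
      unfold mcStep
      rw [PySem.Dict.get?_insert_of_ne _ _ (by omega), PySem.Dict.get?_insert_self]
    · exact ih (mcStep key d a) c h (List.nodup_cons.mp hnd).2
        (fun x hx => hbd x (List.mem_cons_of_mem _ hx))

-- lookup of a lowercase slot 97+c after the fold
lemma mcFold_get_lo (key : Int) : ∀ (l : List Int) (d : PySem.Dict Int Char) (c : Int),
    c ∈ l → l.Nodup → (∀ x ∈ l, 0 ≤ x ∧ x < 26) →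
    (l.foldl (mcStep key) d).get? (97 + c) =
      some (Char.ofNat ((PySem.Int.mod (c * key) 26) + 97).toNat) := by
  intro l
  induction l with
  | nil => intro d c hc; simp at hc
  | cons a t ih =>
    intro d c hc hnd hbd
    simp only [List.foldl_cons]
    rcases List.mem_cons.mp hc with h | h
    · subst h
      have hct : c ∉ t := (List.nodup_cons.mp hnd).1
      have hunt : ∀ x ∈ t, (97 + c : Int) ≠ 65 + x ∧ (97 + c : Int) ≠ 97 + x := by
        intro x hx
        have hbx := hbd x (List.mem_cons_of_mem _ hx)
        have hbc := hbd c (by simp)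
        refine ⟨by omega, fun he => hct ?_⟩
        have : c = x := by omega
        exact this ▸ hx
      rw [mcFold_get_untouched key _ t _ hunt]
      unfold mcStep
      rw [PySem.Dict.get?_insert_self]
    · exact ih (mcStep key d a) c h (List.nodup_cons.mp hnd).2
        (fun x hx => hbd x (List.mem_cons_of_mem _ hx))

lemma pyRange26_nodup : (PySem.List.pyRange 0 26).Nodup := by decide
lemma pyRange26_bdd : ∀ x ∈ PySem.List.pyRange 0 26, 0 ≤ x ∧ x < 26 := by
  intro x hx; exact PySem.List.mem_pyRange_one.mp hx

-- the two per-character functions agree on every character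
lemma mc_char_eq (key : Int) (char : Char) :
    (if PySem.Chars.isalpha char then
      (if PySem.Chars.isupper char then
        Char.ofNat ((PySem.Int.mod (((char.toNat : Int) - 65) * key) 26) + 65).toNat
      else
        Char.ofNat ((PySem.Int.mod (((char.toNat : Int) - 97) * key) 26) + 97).toNat)
    else char) = (((mcTable key).get? (char.toNat : Int)).getD char) := by
  by_cases hU : PySem.Chars.isupper char = true
  · have hb := (char_isupper_iff char).mp hU
    have halpha : PySem.Chars.isalpha char = true := by
      simp [PySem.Chars.isalpha, hU]
    have hget : (mcTable key).get? (char.toNat : Int) =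
        some (Char.ofNat ((PySem.Int.mod (((char.toNat : Int) - 65) * key) 26) + 65).toNat) := by
      have h1 := mcFold_get_hi key (PySem.List.pyRange 0 26) (PySem.Dict.mk [])
        ((char.toNat : Int) - 65) (PySem.List.mem_pyRange_one.mpr (by omega))
        pyRange26_nodup pyRange26_bdd
      rw [mcTable_eq, show ((char.toNat : Int)) = 65 + ((char.toNat : Int) - 65) from by ring]
      rw [show (65 + ((char.toNat : Int) - 65) - 65) = ((char.toNat : Int) - 65) from by ring]
      exact h1
    rw [if_pos halpha, if_pos hU, hget, Option.getD_some]
  · by_cases hL : PySem.Chars.islower char = true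
    · have hb := (char_islower_iff char).mp hL
      have halpha : PySem.Chars.isalpha char = true := by
        simp [PySem.Chars.isalpha, hL]
      have hget : (mcTable key).get? (char.toNat : Int) =
          some (Char.ofNat ((PySem.Int.mod (((char.toNat : Int) - 97) * key) 26) + 97).toNat) := by
        have h1 := mcFold_get_lo key (PySem.List.pyRange 0 26) (PySem.Dict.mk [])
          ((char.toNat : Int) - 97) (PySem.List.mem_pyRange_one.mpr (by omega))
          pyRange26_nodup pyRange26_bdd
        rw [mcTable_eq, show ((char.toNat : Int)) = 97 + ((char.toNat : Int) - 97) from by ring]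
        rw [show (97 + ((char.toNat : Int) - 97) - 97) = ((char.toNat : Int) - 97) from by ring]
        exact h1
      rw [if_pos halpha, if_neg hU, hget, Option.getD_some]
    · have halpha : ¬ (PySem.Chars.isalpha char = true) := by
        simp [PySem.Chars.isalpha, hU, hL]
      have hbU := fun h => hU ((char_isupper_iff char).mpr h)
      have hbL := fun h => hL ((char_islower_iff char).mpr h)
      have hget : (mcTable key).get? (char.toNat : Int) = none := by
        rw [mcTable_eq, mcFold_get_untouched key _ (PySem.List.pyRange 0 26) _ ?_]
        · rfl
        · intro c hc
          have hb := PySem.List.mem_pyRange_one.mp hc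
          constructor <;> intro he
          · exact hbU (by omega)
          · exact hbL (by omega)
      rw [if_neg halpha, hget, Option.getD_none]

-- ===== VERDICT (by name: the statement is the Claim_ definition above) =====
set_option maxRecDepth 4096 in
theorem multiplicative_cipher_spec : Claim_equal_multiplicative_cipher := by
  intro text key _
  unfold Spec_multiplicative_cipher multiplicative_cipher multiplicative_cipher_alt
  refine congrArg String.ofList ?_
  rw [PySem.List.foldl_append_singleton_eq_map (f := fun char =>
    if PySem.Chars.isalpha char then
      (if PySem.Chars.isupper char then
        Char.ofNat ((PySem.Int.mod (((char.toNat : Int) - 65) * key) 26) + 65).toNat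
      else
        Char.ofNat ((PySem.Int.mod (((char.toNat : Int) - 97) * key) 26) + 97).toNat)
    else char)]
  rw [List.nil_append]
  exact List.map_congr_left (fun char _ => mc_char_eq key char)
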